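-- pv_equiv track=rewrite | github.com/dabiged/adventofcode | 2017/day04.py | count_valid2
-- ===== SOURCE A (Python) =====
-- from collections import Counter
--
-- def count_valid2(line):
--     seen_pws=[]
--     for pw in line.split():
--         letters=Counter(list(pw))
--         if letters in seen_pws:
--             return 0
--         seen_pws.append(letters)
--     return 1
-- ===== SOURCE B (Python) =====
-- def count_valid2(line):
--     keys = sorted(''.join(sorted(pw)) for pw in line.split())
--     for a, b in zip(keys, keys[1:]):
--         if a == b:
--             return 0
--     return 1
-- ===== Notes on version B (the rewrite author's own statement) =====
-- stated objective: alternative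
-- what changed: Replaces A's grow-a-list of per-word Counters with a membership scan per word by canonical sorted-letter keys: build all keys, sort the key list once, and scan adjacent pairs for a duplicate.
import Mathlib
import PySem

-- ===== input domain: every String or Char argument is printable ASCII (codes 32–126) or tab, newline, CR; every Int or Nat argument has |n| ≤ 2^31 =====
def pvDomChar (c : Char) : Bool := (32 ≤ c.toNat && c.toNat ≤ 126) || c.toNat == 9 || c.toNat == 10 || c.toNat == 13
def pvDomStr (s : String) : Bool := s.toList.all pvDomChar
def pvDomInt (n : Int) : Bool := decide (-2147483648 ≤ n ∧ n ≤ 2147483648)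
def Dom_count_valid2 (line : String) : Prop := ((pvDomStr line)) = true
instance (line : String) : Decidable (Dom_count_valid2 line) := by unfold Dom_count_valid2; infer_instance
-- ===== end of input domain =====

-- B maps each word to its sorted-letters key, sorts the key list once and scans adjacent pairs
-- for a duplicate, instead of A's grow-a-list of Counters with a membership scan per word.


-- ===== PORT A =====
-- Python's '==' on dicts/Counters ignores insertion order: ported exactly as
-- "the two mappings agree at every key of either" (checked from both sides).
def counterEq (d1 d2 : PySem.Dict Char Int) : Bool :=
  (PySem.Dict.keys d1).all (fun k => PySem.Dict.get? d1 k == PySem.Dict.get? d2 k) &&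
  (PySem.Dict.keys d2).all (fun k => PySem.Dict.get? d1 k == PySem.Dict.get? d2 k)

-- the 'for pw in line.split()' loop with its early 'return 0'
def countA (seen : List (PySem.Dict Char Int)) (ws : List String) : Int :=
  match ws with
  | [] => 1
  | pw :: rest =>
    let letters := PySem.Dict.counter pw.toList
    if seen.any (fun d => counterEq d letters) then 0
    else countA (seen ++ [letters]) rest

def count_valid2 (line : String) : Int := countA [] (PySem.Str.split₀ line)

-- ===== PORT B =====
-- ''.join(sorted(pw))
def keyOf (w : String) : String := String.ofList (PySem.List.sorted w.toList (fun c => c) false)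

-- 'for a, b in zip(keys, keys[1:]): if a == b: return 0'
def hasAdjDup (l : List String) : Bool :=
  match l with
  | a :: b :: t => a == b || hasAdjDup (b :: t)
  | _ => false

def count_valid2_alt (line : String) : Int :=
  let keys := PySem.List.sorted ((PySem.Str.split₀ line).map keyOf) (fun k => k) false
  if hasAdjDup keys then 0 else 1

-- ===== PRECONDITION & SPEC =====
def Spec_count_valid2 (line : String) (out : Int) : Prop := out = count_valid2_alt line
instance (line : String) (out : Int) : Decidable (Spec_count_valid2 line out) := by unfold Spec_count_valid2; infer_instance

-- ===== CLAIM (what is proved, stated in full; the proofs are below) =====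
def Claim_equal_count_valid2 : Prop := ∀ (line : String), Dom_count_valid2 line → Spec_count_valid2 line (count_valid2 line)

-- ===== LEMMAS AND PROOFS =====

lemma get?_counter (xs : List Char) (c : Char) :
    PySem.Dict.get? (PySem.Dict.counter xs) c
      = if c ∈ xs then some (xs.count c : Int) else none := by
  by_cases h : c ∈ xs
  · have hc : (PySem.Dict.counter xs).contains c = true := by
      rw [PySem.Dict.contains_counter]; simpa using h
    rw [PySem.Dict.contains_eq_isSome_get?] at hc
    obtain ⟨v, hv⟩ := Option.isSome_iff_exists.mp hc
    have hd := PySem.Dict.getD_eq_get?_getD (PySem.Dict.counter xs) c 0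
    rw [PySem.Dict.getD_counter, hv] at hd
    simp only [Option.getD_some] at hd
    simp [h, hv, hd]
  · have hn : PySem.Dict.get? (PySem.Dict.counter xs) c = none := by
      rw [PySem.Dict.get?_eq_none_iff_contains, PySem.Dict.contains_counter]
      simpa using h
    simp [h, hn]

lemma counterEq_iff (u v : List Char) :
    counterEq (PySem.Dict.counter u) (PySem.Dict.counter v) = true ↔ u.Perm v := by
  simp only [counterEq, Bool.and_eq_true, List.all_eq_true, PySem.Dict.keys_counter,
    PySem.Set.mem_ofList, get?_counter, beq_iff_eq]
  constructor
  · rintro ⟨h1, h2⟩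
    rw [List.perm_iff_count]
    intro c
    by_cases hu : c ∈ u <;> by_cases hv : c ∈ v
    · have := h1 c hu; simp [hu, hv] at this; exact_mod_cast this
    · have := h1 c hu; simp [hu, hv] at this
    · have := h2 c hv; simp [hu, hv] at this
    · simp [List.count_eq_zero.mpr hu, List.count_eq_zero.mpr hv]
  · intro hp
    have hc := List.perm_iff_count.mp hp
    have hm : ∀ c : Char, c ∈ u ↔ c ∈ v := fun c => hp.mem_iff
    constructor <;> intro k hk <;> simp [(hm k).mp, (hm k).mpr, hk, hc k]

lemma keyOf_eq_iff (u v : String) : keyOf u = keyOf v ↔ u.toList.Perm v.toList := by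
  rw [← PySem.List.sorted_id_eq_sorted_id_iff_perm]
  constructor
  · intro h
    have := congrArg String.toList h
    simpa [keyOf] using this
  · intro h; simp [keyOf, h]

lemma hasAdjDup_false_iff (l : List String) (h : l.Pairwise (· ≤ ·)) :
    hasAdjDup l = false ↔ l.Nodup := by
  induction l with
  | nil => simp [hasAdjDup]
  | cons a t ih =>
    match t, h with
    | [], _ => simp [hasAdjDup]
    | b :: t', h =>
      obtain ⟨hrel, hpt⟩ := List.pairwise_cons.mp h
      have hab : a ≤ b := hrel b List.mem_cons_self
      rw [List.nodup_cons]
      constructor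
      · intro hf
        simp only [hasAdjDup, Bool.or_eq_false_iff, beq_eq_false_iff_ne, ne_eq] at hf
        obtain ⟨hne, hrest⟩ := hf
        have hnd := (ih hpt).mp hrest
        refine ⟨?_, hnd⟩
        have halt : a < b := lt_of_le_of_ne hab hne
        intro hmem
        rcases List.mem_cons.mp hmem with rfl | hx
        · exact hne rfl
        · obtain ⟨hrelb, _⟩ := List.pairwise_cons.mp hpt
          exact absurd (hrelb a hx) (not_le.mpr halt)
      · rintro ⟨hnotmem, hnd⟩
        simp only [hasAdjDup, Bool.or_eq_false_iff, beq_eq_false_iff_ne, ne_eq]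
        exact ⟨fun hab' => hnotmem (hab' ▸ List.mem_cons_self), (ih hpt).mpr hnd⟩

lemma countA_eq (ws prev : List String) (hnd : (prev.map keyOf).Nodup) :
    countA (prev.map (fun w => PySem.Dict.counter w.toList)) ws
      = if (((prev ++ ws).map keyOf).Nodup) then 1 else 0 := by
  induction ws generalizing prev with
  | nil => simp [countA, hnd]
  | cons pw rest ih =>
    have hmemiff :
        ((prev.map (fun w => PySem.Dict.counter w.toList)).any
            (fun d => counterEq d (PySem.Dict.counter pw.toList)) = true)
          ↔ keyOf pw ∈ prev.map keyOf := by
      simp only [List.any_eq_true, List.mem_map]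
      constructor
      · rintro ⟨d, ⟨w, hw, rfl⟩, hEq⟩
        exact ⟨w, hw, ((keyOf_eq_iff w pw).mpr (counterEq_iff _ _ |>.mp hEq)).symm ▸ rfl⟩
      · rintro ⟨w, hw, hkey⟩
        exact ⟨PySem.Dict.counter w.toList, ⟨w, hw, rfl⟩,
          (counterEq_iff _ _).mpr ((keyOf_eq_iff w pw).mp hkey)⟩
    by_cases hmem : keyOf pw ∈ prev.map keyOf
    · have : ¬ (((prev ++ pw :: rest).map keyOf).Nodup) := by
        intro hndall
        rw [List.map_append, List.nodup_append] at hndall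
        exact hndall.2.2 (keyOf pw) hmem (keyOf pw) (by simp) rfl
      simp only [countA, hmemiff.mpr hmem, if_true, this, if_false]
    · have hstep : prev.map (fun w => PySem.Dict.counter w.toList) ++ [PySem.Dict.counter pw.toList]
          = (prev ++ [pw]).map (fun w => PySem.Dict.counter w.toList) := by simp
      have hnd' : ((prev ++ [pw]).map keyOf).Nodup := by
        rw [List.map_append, List.nodup_append]
        refine ⟨hnd, List.nodup_singleton _, ?_⟩
        intro a ha b hb
        rw [List.map_cons, List.map_nil, List.mem_singleton] at hb
        intro heq
        exact hmem ((heq.trans hb) ▸ ha)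
      have hfalse : (prev.map (fun w => PySem.Dict.counter w.toList)).any
          (fun d => counterEq d (PySem.Dict.counter pw.toList)) = false := by
        rw [Bool.eq_false_iff]; intro h; exact hmem (hmemiff.mp h)
      simp only [countA, hfalse, Bool.false_eq_true, if_false]
      rw [hstep, ih (prev ++ [pw]) hnd']
      have : prev ++ pw :: rest = (prev ++ [pw]) ++ rest := by simp
      rw [this]

-- ===== VERDICT (by name: the statement is the Claim_ definition above) =====
theorem count_valid2_spec : Claim_equal_count_valid2 := by
  intro line _
  unfold Spec_count_valid2 count_valid2 count_valid2_alt
  have hA := countA_eq (PySem.Str.split₀ line) [] (by simp)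
  simp only [List.map_nil, List.nil_append] at hA
  rw [hA]
  have hpair := PySem.List.sorted_pairwise ((PySem.Str.split₀ line).map keyOf) (fun k => k)
  have hadj := hasAdjDup_false_iff _ (by simpa using hpair)
  have hperm := PySem.List.sorted_perm ((PySem.Str.split₀ line).map keyOf) (fun k => k) false
  have hndiff := hperm.nodup_iff
  by_cases h : ((PySem.Str.split₀ line).map keyOf).Nodup
  · have := hadj.mpr (hndiff.mpr h)
    simp [h, this]
  · have hns : ¬ (PySem.List.sorted ((PySem.Str.split₀ line).map keyOf) (fun k => k) false).Nodup :=
      fun hh => h (hndiff.mp hh)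
    have ht : hasAdjDup (PySem.List.sorted ((PySem.Str.split₀ line).map keyOf) (fun k => k) false) = true := by
      cases hc : hasAdjDup (PySem.List.sorted ((PySem.Str.split₀ line).map keyOf) (fun k => k) false) with
      | false => exact absurd (hadj.mp hc) hns
      | true => rfl
    simp [h, ht]
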